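-- pv_equiv track=rewrite | github.com/gmacgillivray/AdventOfCode2024 | AoC_2024_Puzzle 11e.py | rock_expansion_function
-- ===== SOURCE A (Python) =====
-- def rock_expansion_function(rock_num, num_iters):
--     d = [rock_num]
--
--     def expand(d, num_iters):
--         if num_iters == 0:
--             return d
--
--         new_d = []
--         for num in d:
--             if num == 0:
--                 new_d.append(1)
--             else:
--                 working_string = str(num)
--                 if len(working_string) % 2 != 0:
--                     new_d.append(num * 2024)
--                 else:
--                     half_digits = int(len(working_string) / 2)
--                     string_one = working_string[:half_digits]
--                     string_two = working_string[half_digits:]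
--                     new_d.append(int(string_one))
--                     new_d.append(int(string_two))
--         return expand(new_d, num_iters - 1)
--
--     return expand(d, num_iters)
-- ===== SOURCE B (Python) =====
-- def rock_expansion_function(rock_num, num_iters):
--     # Depth-first per-stone recursion instead of breadth-first level rebuilding.
--     def grow(num, iters):
--         if iters == 0:
--             return [num]
--         if num == 0:
--             children = [1]
--         else:
--             s = str(num)
--             if len(s) % 2 != 0:
--                 children = [num * 2024]
--             else:
--                 half = len(s) // 2
--                 children = [int(s[:half]), int(s[half:])]
--         out = []
--         for c in children:
--             out.extend(grow(c, iters - 1))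
--         return out
--     return grow(rock_num, num_iters)
-- ===== Notes on version B (the rewrite author's own statement) =====
-- stated objective: alternative
-- what changed: Replaced A's breadth-first rebuild of the entire stone list on every iteration with a per-stone depth-first recursion grow(num, iters) that concatenates its children's expansions, producing the same leaves in the same order.
-- outside the precondition, e.g. on rock_expansion_function(-12, 1): A returns [-24288], B returns [-24288]; on rock_expansion_function(-1, 1): A raises ValueError, B raises ValueError
import Mathlib
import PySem

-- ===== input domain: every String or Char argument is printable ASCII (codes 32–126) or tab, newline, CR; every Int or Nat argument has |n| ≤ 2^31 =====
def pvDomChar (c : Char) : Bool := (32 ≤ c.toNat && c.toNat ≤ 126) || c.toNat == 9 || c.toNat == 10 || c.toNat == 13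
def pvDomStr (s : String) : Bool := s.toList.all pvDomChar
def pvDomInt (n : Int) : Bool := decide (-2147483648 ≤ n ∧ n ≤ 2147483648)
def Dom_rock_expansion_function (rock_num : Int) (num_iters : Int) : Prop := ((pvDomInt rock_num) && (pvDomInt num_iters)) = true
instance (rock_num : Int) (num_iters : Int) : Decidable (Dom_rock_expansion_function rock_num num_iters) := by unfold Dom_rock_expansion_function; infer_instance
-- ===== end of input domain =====

-- B replaces A's breadth-first level-by-level rebuilding of the whole stone list by a
-- depth-first per-stone recursion producing the same leaves in the same left-to-right order (objective: alternative).


-- ===== PORT A =====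
-- one level of A's rebuild loop: the body of 'for num in d' appending into new_d
def pvStepA (d : List Int) : List Int :=
  d.foldl (fun new_d num =>
    if num == 0 then new_d ++ [1]
    else
      let working_string := PySem.Int.toChars num
      if (working_string.length : Int) % 2 ≠ 0 then new_d ++ [num * 2024]
      else
        let half_digits : Int := PySem.Int.floordiv (working_string.length : Int) 2
        let string_one := PySem.List.slice working_string none (some half_digits)
        let string_two := PySem.List.slice working_string (some half_digits) none
        -- int(...) raises ValueError where ofChars? is none (only for negative rock_num, outside Pre_)
        new_d ++ [(PySem.Int.ofChars? string_one).getD 0] ++ [(PySem.Int.ofChars? string_two).getD 0]) []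

-- 'expand' recursion, fuel = num_iters (Python diverges for negative num_iters, outside Pre_)
def pvExpandA (d : List Int) (fuel : Nat) : List Int :=
  match fuel with
  | 0 => d
  | k + 1 => pvExpandA (pvStepA d) k

def rock_expansion_function (rock_num : Int) (num_iters : Int) : List Int :=
  pvExpandA [rock_num] num_iters.toNat

-- ===== PORT B =====
-- the single-stone rule of Source B's grow
def pvChildrenB (num : Int) : List Int :=
  if num == 0 then [1]
  else
    let s := PySem.Int.toChars num
    if (s.length : Int) % 2 ≠ 0 then [num * 2024]
    else
      let half : Int := PySem.Int.floordiv (s.length : Int) 2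
      [(PySem.Int.ofChars? (PySem.List.slice s none (some half))).getD 0,
       (PySem.Int.ofChars? (PySem.List.slice s (some half) none)).getD 0]

-- grow(num, iters): depth-first expansion of one stone, fuel = iters
def pvGrowB (fuel : Nat) (num : Int) : List Int :=
  match fuel with
  | 0 => [num]
  | k + 1 => (pvChildrenB num).foldl (fun out c => out ++ pvGrowB k c) []

def rock_expansion_function_alt (rock_num : Int) (num_iters : Int) : List Int :=
  pvGrowB num_iters.toNat rock_num

-- ===== PRECONDITION & SPEC =====
-- Pre_ excludes negative num_iters, on which A recurses forever, and negative rock_num, on which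
-- A raises ValueError (int('-…') on a sign-only split half) for some iteration counts.
def Pre_rock_expansion_function (rock_num : Int) (num_iters : Int) : Prop :=
  0 ≤ rock_num ∧ 0 ≤ num_iters
instance (rock_num : Int) (num_iters : Int) : Decidable (Pre_rock_expansion_function rock_num num_iters) := by unfold Pre_rock_expansion_function; infer_instance

def pvWitness_rock_expansion_function : Int × Int := (125, 3)

def Spec_rock_expansion_function (rock_num : Int) (num_iters : Int) (out : List Int) : Prop := out = rock_expansion_function_alt rock_num num_iters
instance (rock_num : Int) (num_iters : Int) (out : List Int) : Decidable (Spec_rock_expansion_function rock_num num_iters out) := by unfold Spec_rock_expansion_function; infer_instance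

-- ===== CLAIM (what is proved, stated in full; the proofs are below) =====
def Claim_equal_rock_expansion_function : Prop := ∀ (rock_num : Int) (num_iters : Int), Dom_rock_expansion_function rock_num num_iters → Pre_rock_expansion_function rock_num num_iters → Spec_rock_expansion_function rock_num num_iters (rock_expansion_function rock_num num_iters)

-- ===== LEMMAS AND PROOFS =====

-- A's loop body produces, per stone, exactly B's child list
theorem pvStepA_eq_flatMap (d : List Int) :
    pvStepA d = d.flatMap pvChildrenB := by
  have hbody : (fun new_d num =>
    if num == 0 then new_d ++ [1]
    else
      let working_string := PySem.Int.toChars num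
      if (working_string.length : Int) % 2 ≠ 0 then new_d ++ [num * 2024]
      else
        let half_digits : Int := PySem.Int.floordiv (working_string.length : Int) 2
        let string_one := PySem.List.slice working_string none (some half_digits)
        let string_two := PySem.List.slice working_string (some half_digits) none
        new_d ++ [(PySem.Int.ofChars? string_one).getD 0] ++ [(PySem.Int.ofChars? string_two).getD 0])
      = (fun (new_d : List Int) (num : Int) => new_d ++ pvChildrenB num) := by
    funext new_d num
    simp only [pvChildrenB]
    split_ifs <;> simp
  rw [pvStepA, hbody, PySem.List.foldl_append_eq_flatMap]
  simp

theorem pvGrowB_succ (k : Nat) (num : Int) :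
    pvGrowB (k + 1) num = (pvChildrenB num).flatMap (pvGrowB k) := by
  rw [pvGrowB, PySem.List.foldl_append_eq_flatMap]
  simp

theorem pvExpandA_eq_flatMap_growB (k : Nat) (d : List Int) :
    pvExpandA d k = d.flatMap (pvGrowB k) := by
  induction k generalizing d with
  | zero => simp [pvExpandA, pvGrowB]
  | succ k ih =>
    rw [pvExpandA, ih, pvStepA_eq_flatMap, List.flatMap_assoc]
    congr 1
    funext num
    rw [pvGrowB_succ]

-- ===== VERDICT (by name: the statement is the Claim_ definition above) =====
theorem rock_expansion_function_spec : Claim_equal_rock_expansion_function := by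
  intro rock_num num_iters _ _
  unfold Spec_rock_expansion_function rock_expansion_function rock_expansion_function_alt
  rw [pvExpandA_eq_flatMap_growB]
  simp
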